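-- pv_equiv track=rewrite | github.com/dwisdom0/aoc2021 | day05/day5_1.py | apply_verts
-- ===== SOURCE A (Python) =====
-- def apply_verts(board, verts):
--   """
--   place the vertical lines on the board
--   """
--   for v in verts:
--     x1 = v[0][0]
--     y1 = v[0][1]
--     y2 = v[1][1]
--     # range(larger, smaller) doesn't do anything
--     # so do it both ways to make sure we have them the right
--     # way around
--     for y in range(y1, y2+1):
--       board[y][x1] += 1
--     for y in range(y2, y1+1):
--       board[y][x1] += 1
--   return board
-- ===== SOURCE B (Python) =====
-- def apply_verts(board, verts):
--   """
--   place the vertical lines on the board: per column difference arrays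
--   plus one prefix-sum sweep, instead of walking every segment cell by cell
--   """
--   n = len(board)
--   cols = {}
--   for v in verts:
--     x1 = v[0][0]
--     y1 = v[0][1]
--     y2 = v[1][1]
--     diff = cols.setdefault(x1, [0] * (n + 1))
--     if y1 <= y2:
--       diff[y1] += 1
--       diff[y2 + 1] -= 1
--     if y2 <= y1:
--       diff[y2] += 1
--       diff[y1 + 1] -= 1
--   for x1, diff in cols.items():
--     run = 0
--     for y in range(n):
--       run += diff[y]
--       if run:
--         board[y][x1] += run
--   return board
-- ===== Notes on version B (the rewrite author's own statement) =====
-- stated objective: alternative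
-- what changed: Instead of walking every segment cell by cell (twice per vert), B records each vertical segment as two entries of a per-column difference array (grouped in a dict keyed by column) and then adds one prefix-sum sweep per touched column to the board.
-- outside the precondition, e.g. on apply_verts([[0], [0]], [[[0, -1], [0, -1]]]): A returns [[0], [2]], B returns [[-2], [-2]]; on apply_verts([[0, 0]], [[[-1, 0], [0, 0]]]): A returns [[0, 2]], B returns [[0, 2]]
import Mathlib
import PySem

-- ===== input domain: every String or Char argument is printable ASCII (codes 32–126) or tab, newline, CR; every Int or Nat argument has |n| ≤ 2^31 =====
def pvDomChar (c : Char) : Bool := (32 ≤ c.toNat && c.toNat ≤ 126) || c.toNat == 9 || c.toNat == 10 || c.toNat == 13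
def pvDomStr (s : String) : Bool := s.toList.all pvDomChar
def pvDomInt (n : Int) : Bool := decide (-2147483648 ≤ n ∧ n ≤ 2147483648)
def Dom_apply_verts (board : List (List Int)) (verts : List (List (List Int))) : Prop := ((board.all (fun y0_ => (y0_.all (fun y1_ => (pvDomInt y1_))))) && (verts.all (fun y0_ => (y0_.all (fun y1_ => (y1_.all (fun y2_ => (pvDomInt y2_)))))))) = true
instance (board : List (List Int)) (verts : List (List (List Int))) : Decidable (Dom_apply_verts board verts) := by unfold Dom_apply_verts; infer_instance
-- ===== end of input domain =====

-- B replaces A's cell-by-cell walk along every segment by per-column difference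
-- arrays plus one prefix-sum sweep (equivalence is about the returned board; both
-- Pythons also mutate `board` in place, reaching the same final state).

-- shared accessors: x1 = v[0][0], y1 = v[0][1], y2 = v[1][1]
def pvX (v : List (List Int)) : Int := PySem.List.pyGetD (PySem.List.pyGetD v 0 []) 0 0
def pvY1 (v : List (List Int)) : Int := PySem.List.pyGetD (PySem.List.pyGetD v 0 []) 1 0
def pvY2 (v : List (List Int)) : Int := PySem.List.pyGetD (PySem.List.pyGetD v 1 []) 1 0

-- ===== PORT A =====
-- board[y][x1] += 1
def pvInc (b : List (List Int)) (y x : Int) : List (List Int) :=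
  let row := PySem.List.pyGetD b y []
  PySem.List.pySetD b y (PySem.List.pySetD row x (PySem.List.pyGetD row x 0 + 1))

def apply_verts (board : List (List Int)) (verts : List (List (List Int))) : List (List Int) :=
  verts.foldl (fun b v =>
    let x1 := pvX v
    let y1 := pvY1 v
    let y2 := pvY2 v
    let b1 := (PySem.List.pyRange y1 (y2 + 1)).foldl (fun bb y => pvInc bb y x1) b
    (PySem.List.pyRange y2 (y1 + 1)).foldl (fun bb y => pvInc bb y x1) b1) board

-- ===== PORT B =====
-- the two `if`-guarded double updates of the column's difference array
def pvVDiff (v : List (List Int)) (diff : List Int) : List Int :=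
  let y1 := pvY1 v
  let y2 := pvY2 v
  let diff :=
    if y1 ≤ y2 then
      let d1 := PySem.List.pySetD diff y1 (PySem.List.pyGetD diff y1 0 + 1)
      PySem.List.pySetD d1 (y2 + 1) (PySem.List.pyGetD d1 (y2 + 1) 0 - 1)
    else diff
  if y2 ≤ y1 then
    let d1 := PySem.List.pySetD diff y2 (PySem.List.pyGetD diff y2 0 + 1)
    PySem.List.pySetD d1 (y1 + 1) (PySem.List.pyGetD d1 (y1 + 1) 0 - 1)
  else diff

-- board[y][x1] += run
def pvAddCell (b : List (List Int)) (y x r : Int) : List (List Int) :=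
  let row := PySem.List.pyGetD b y []
  PySem.List.pySetD b y (PySem.List.pySetD row x (PySem.List.pyGetD row x 0 + r))

def apply_verts_alt (board : List (List Int)) (verts : List (List (List Int))) : List (List Int) :=
  let n := board.length
  let init : List Int := List.replicate (n + 1) 0
  let cols := verts.foldl (fun (cols : PySem.Dict Int (List Int)) v =>
      let x1 := pvX v
      let cols1 := cols.setdefault x1 init
      let diff := cols1.getD x1 init
      cols1.insert x1 (pvVDiff v diff)) PySem.Dict.empty
  cols.items.foldl (fun b p =>
      ((PySem.List.pyRange 0 (n : Int)).foldl (fun (st : List (List Int) × Int) y =>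
          let run := st.2 + PySem.List.pyGetD p.2 y 0
          (if run ≠ 0 then pvAddCell st.1 y p.1 run else st.1, run)) (b, 0)).1) board

-- ===== PRECONDITION & SPEC =====
-- Pre_ restricts to segments that lie on the board (every touched row index in
-- [0, len(board)) and the column index in [0, len(row)) for each touched row) and
-- to verts carrying the two 2-point entries A indexes; outside it A either raises
-- IndexError or — for small negative coordinates — silently wraps around the
-- board edge, an accident of Python negative indexing outside the natural domain.
def Pre_apply_verts (board : List (List Int)) (verts : List (List (List Int))) : Prop :=
  ∀ v ∈ verts,
    2 ≤ v.length ∧ 2 ≤ (v.getD 0 []).length ∧ 2 ≤ (v.getD 1 []).length ∧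
    0 ≤ min (pvY1 v) (pvY2 v) ∧ max (pvY1 v) (pvY2 v) < (board.length : Int) ∧
    ∀ y ∈ List.range board.length,
      (min (pvY1 v) (pvY2 v) ≤ (y : Int) ∧ (y : Int) ≤ max (pvY1 v) (pvY2 v)) →
      0 ≤ pvX v ∧ pvX v < ((board.getD y []).length : Int)

instance (board : List (List Int)) (verts : List (List (List Int))) : Decidable (Pre_apply_verts board verts) := by
  unfold Pre_apply_verts; infer_instance

def pvWitness_apply_verts : List (List Int) × List (List (List Int)) :=
  ([[0, 0], [0, 0]], [[[1, 0], [1, 1]]])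

def Spec_apply_verts (board : List (List Int)) (verts : List (List (List Int))) (out : List (List Int)) : Prop := out = apply_verts_alt board verts
instance (board : List (List Int)) (verts : List (List (List Int))) (out : List (List Int)) : Decidable (Spec_apply_verts board verts out) := by unfold Spec_apply_verts; infer_instance

-- ===== CLAIM (what is proved, stated in full; the proofs are below) =====
def Claim_equal_apply_verts : Prop := ∀ (board : List (List Int)) (verts : List (List (List Int))), Dom_apply_verts board verts → Pre_apply_verts board verts → Spec_apply_verts board verts (apply_verts board verts)

-- ===== LEMMAS AND PROOFS =====

-- how often vert v covers (Int) row y: one per nonempty range, two when y1 = y2 = y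
def pvCov (v : List (List Int)) (y : Int) : Int :=
  (if pvY1 v ≤ y ∧ y ≤ pvY2 v then 1 else 0) + (if pvY2 v ≤ y ∧ y ≤ pvY1 v then 1 else 0)

-- total amount added to cell (y, j)
def pvTot (verts : List (List (List Int))) (y j : Int) : Int :=
  ((verts.filter (fun v => pvX v = j)).map (fun v => pvCov v y)).sum

-- cell accessor used throughout the proofs
def pvCell (b : List (List Int)) (y j : Nat) : Int := (b.getD y []).getD j 0

-- prefix sum of a difference array up to and including row y
def pvPref (d : List Int) (y : Nat) : Int := ((List.range (y + 1)).map (fun t => d.getD t 0)).sum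


-- ---------- generic helpers ----------

theorem pv_getD_set {α : Type} (xs : List α) (i k : Nat) (v : α) (d0 : α) :
    (xs.set i v).getD k d0 = if i = k ∧ i < xs.length then v else xs.getD k d0 := by
  rcases eq_or_ne i k with rfl | h1
  · by_cases h2 : i < xs.length
    · simp [h2, List.getD_eq_getElem?_getD]
    · have hnone : xs[i]? = none := by rw [List.getElem?_eq_none_iff]; omega
      simp only [List.getD_eq_getElem?_getD, List.getElem?_set, hnone]
      simp [h2]
  · simp [List.getD_eq_getElem?_getD, h1]

theorem pv_sum_filter {α : Type} (l : List α) (p : α → Prop) [DecidablePred p] (f : α → Int) :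
    ((l.filter (fun v => decide (p v))).map f).sum = (l.map (fun v => if p v then f v else 0)).sum := by
  induction l with
  | nil => simp
  | cons a t ih =>
    by_cases h : p a <;> simp [h, ih]

theorem pv_sum_ite_nodup (l : List Int) (hnd : l.Nodup) (j : Int) (f : Int → Int) :
    (l.map (fun x => if x = j then f x else 0)).sum = if j ∈ l then f j else 0 := by
  induction l with
  | nil => simp
  | cons a t ih =>
    simp only [List.nodup_cons] at hnd
    by_cases h : a = j
    · subst h
      simp [ih hnd.2, hnd.1]
    · have : (j ∈ a :: t) ↔ j ∈ t := by
        simp [eq_comm] at h ⊢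
        intro hj; exact absurd hj h
      simp only [List.map_cons, List.sum_cons, if_neg h, ih hnd.2, zero_add]
      by_cases hj : j ∈ t
      · simp [hj, this.mpr hj]
      · simp [hj, (not_iff_not.mpr this).mpr hj]

-- ---------- shape ----------

def pvSameShape (b b' : List (List Int)) : Prop :=
  b'.length = b.length ∧ ∀ y : Nat, (b'.getD y []).length = (b.getD y []).length

theorem pvSameShape_refl (b : List (List Int)) : pvSameShape b b := ⟨rfl, fun _ => rfl⟩

theorem pvSameShape_trans {a b c : List (List Int)} (h1 : pvSameShape a b) (h2 : pvSameShape b c) :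
    pvSameShape a c := ⟨h2.1.trans h1.1, fun y => (h2.2 y).trans (h1.2 y)⟩

theorem pvPre_shape {b b' : List (List Int)} (verts : List (List (List Int)))
    (h : pvSameShape b b') (hp : Pre_apply_verts b verts) : Pre_apply_verts b' verts := by
  intro v hv
  obtain ⟨h1, h2, h3, h4, h5, h6⟩ := hp v hv
  refine ⟨h1, h2, h3, h4, by rw [h.1]; exact h5, ?_⟩
  intro y hy hcov
  rw [h.1] at hy
  obtain ⟨ha, hb⟩ := h6 y hy hcov
  exact ⟨ha, by rw [h.2 y]; exact hb⟩

-- ---------- cell effect of a single board update ----------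

theorem pvAddCell_shape (b : List (List Int)) (y x r : Int) (hy : 0 ≤ y) :
    pvSameShape b (pvAddCell b y x r) := by
  unfold pvAddCell
  rw [PySem.List.pySetD_of_nonneg _ _ hy]
  refine ⟨by simp, ?_⟩
  intro y'
  simp only [List.getD_eq_getElem?_getD, List.getElem?_set]
  split_ifs with h1 h2
  · subst h1
    simp only [Option.getD_some, PySem.List.length_pySetD]
    rw [PySem.List.pyGetD_eq_getElem b ([]:List Int) hy (show y < (b.length:Int) by omega)]
    simp [List.getElem?_eq_getElem h2]
  · subst h1
    simp [List.getElem?_eq_none_iff.mpr (show b.length ≤ y.toNat by omega)]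
  · rfl

theorem pvAddCell_cell (b : List (List Int)) (y x r : Int) (y' j : Nat)
    (hy : 0 ≤ y) (hylt : y < (b.length : Int))
    (hx : 0 ≤ x) (hxlt : x < ((b.getD y.toNat []).length : Int)) :
    pvCell (pvAddCell b y x r) y' j =
      pvCell b y' j + (if y.toNat = y' ∧ x.toNat = j then r else 0) := by
  have hyn : y.toNat < b.length := by omega
  have hrow : PySem.List.pyGetD b y [] = b.getD y.toNat [] := by
    rw [PySem.List.pyGetD_eq_getElem b ([]:List Int) hy hylt]
    exact (List.getD_eq_getElem b [] hyn).symm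
  have hxn : x.toNat < (b.getD y.toNat []).length := by omega
  have hcellx : PySem.List.pyGetD (b.getD y.toNat []) x 0 = (b.getD y.toNat []).getD x.toNat 0 := by
    rw [PySem.List.pyGetD_eq_getElem _ (0:Int) hx (by exact_mod_cast hxlt)]
    exact (List.getD_eq_getElem _ 0 hxn).symm
  unfold pvAddCell pvCell
  rw [PySem.List.pySetD_of_nonneg _ _ hy, PySem.List.pySetD_of_nonneg _ _ hx, hrow, hcellx]
  rw [pv_getD_set]
  by_cases h1 : y.toNat = y'
  · subst h1
    rw [if_pos ⟨rfl, hyn⟩, pv_getD_set]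
    by_cases h2 : x.toNat = j
    · subst h2
      rw [if_pos ⟨rfl, hxn⟩, if_pos ⟨rfl, rfl⟩]
    · rw [if_neg (by tauto), if_neg (by tauto)]
      omega
  · rw [if_neg (by tauto), if_neg (by tauto)]
    omega

-- pvInc is the r = 1 special case
theorem pvInc_eq_addCell (b : List (List Int)) (y x : Int) : pvInc b y x = pvAddCell b y x 1 := rfl

-- ---------- A side ----------

theorem pvIncFold_cell (x : Int) :
    ∀ (fuel : Nat) (a c : Int) (bd : List (List Int)),
      (c - a).toNat ≤ fuel →
      (∀ t : Int, a ≤ t → t < c →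
        0 ≤ t ∧ t < (bd.length : Int) ∧ 0 ≤ x ∧ x < ((bd.getD t.toNat []).length : Int)) →
      pvSameShape bd ((PySem.List.pyRange a c).foldl (fun bb y => pvInc bb y x) bd) ∧
      ∀ y' j : Nat,
        pvCell ((PySem.List.pyRange a c).foldl (fun bb y => pvInc bb y x) bd) y' j =
          pvCell bd y' j + (if x.toNat = j ∧ a ≤ (y' : Int) ∧ (y' : Int) < c then 1 else 0) := by
  intro fuel
  induction fuel with
  | zero =>
    intro a c bd hf hran
    rw [PySem.List.pyRange_one_eq_nil (by omega)]
    refine ⟨pvSameShape_refl bd, fun y' j => ?_⟩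
    rw [if_neg (by omega)]
    simp
  | succ n ih =>
    intro a c bd hf hran
    by_cases hlt : a < c
    case neg =>
      rw [PySem.List.pyRange_one_eq_nil (by omega)]
      refine ⟨pvSameShape_refl bd, fun y' j => ?_⟩
      rw [if_neg (by omega)]
      simp
    case pos =>
      rw [PySem.List.pyRange_one_cons hlt]
      simp only [List.foldl_cons]
      obtain ⟨ht0, ht1, ht2, ht3⟩ := hran a le_rfl hlt
      have hsh1 : pvSameShape bd (pvInc bd a x) := by
        rw [pvInc_eq_addCell]; exact pvAddCell_shape bd a x 1 ht0
      have hran' : ∀ t : Int, a + 1 ≤ t → t < c →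
          0 ≤ t ∧ t < ((pvInc bd a x).length : Int) ∧ 0 ≤ x ∧
            x < (((pvInc bd a x).getD t.toNat []).length : Int) := by
        intro t h1 h2
        obtain ⟨g0, g1, g2, g3⟩ := hran t (by omega) h2
        refine ⟨g0, by rw [hsh1.1]; exact g1, g2, by rw [hsh1.2 t.toNat]; exact g3⟩
      obtain ⟨ihs, ihc⟩ := ih (a + 1) c (pvInc bd a x) (by omega) hran'
      refine ⟨pvSameShape_trans hsh1 ihs, ?_⟩
      intro y' j
      rw [ihc y' j, pvInc_eq_addCell, pvAddCell_cell bd a x 1 y' j ht0 ht1 ht2 ht3]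
      have hae : (a.toNat = y') ↔ a = (y' : Int) := by omega
      split_ifs with p1 p2 p3 p2 p3 <;> omega

theorem pvStepA_cell (bd : List (List Int)) (v : List (List Int))
    (h4 : 0 ≤ min (pvY1 v) (pvY2 v)) (h5 : max (pvY1 v) (pvY2 v) < (bd.length : Int))
    (h6 : ∀ y ∈ List.range bd.length,
      (min (pvY1 v) (pvY2 v) ≤ (y : Int) ∧ (y : Int) ≤ max (pvY1 v) (pvY2 v)) →
      0 ≤ pvX v ∧ pvX v < ((bd.getD y []).length : Int)) :
    pvSameShape bd
      ((PySem.List.pyRange (pvY2 v) (pvY1 v + 1)).foldl (fun bb y => pvInc bb y (pvX v))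
        ((PySem.List.pyRange (pvY1 v) (pvY2 v + 1)).foldl (fun bb y => pvInc bb y (pvX v)) bd)) ∧
    ∀ y' j : Nat,
      pvCell
        ((PySem.List.pyRange (pvY2 v) (pvY1 v + 1)).foldl (fun bb y => pvInc bb y (pvX v))
          ((PySem.List.pyRange (pvY1 v) (pvY2 v + 1)).foldl (fun bb y => pvInc bb y (pvX v)) bd)) y' j =
        pvCell bd y' j + (if pvX v = (j : Int) then pvCov v (y' : Int) else 0) := by
  have hx0 : 0 ≤ pvX v := by
    refine (h6 (min (pvY1 v) (pvY2 v)).toNat ?_ ⟨by omega, by omega⟩).1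
    rw [List.mem_range]; omega
  have hran1 : ∀ t : Int, pvY1 v ≤ t → t < pvY2 v + 1 →
      0 ≤ t ∧ t < (bd.length : Int) ∧ 0 ≤ pvX v ∧
        pvX v < ((bd.getD t.toNat []).length : Int) := by
    intro t h1 h2
    have hm : t.toNat ∈ List.range bd.length := by rw [List.mem_range]; omega
    obtain ⟨g1, g2⟩ := h6 t.toNat hm ⟨by omega, by omega⟩
    exact ⟨by omega, by omega, g1, g2⟩
  obtain ⟨sh1, c1⟩ := pvIncFold_cell (pvX v) (pvY2 v + 1 - pvY1 v).toNat (pvY1 v) (pvY2 v + 1) bd le_rfl hran1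
  set bd1 := (PySem.List.pyRange (pvY1 v) (pvY2 v + 1)).foldl (fun bb y => pvInc bb y (pvX v)) bd with hbd1
  have hran2 : ∀ t : Int, pvY2 v ≤ t → t < pvY1 v + 1 →
      0 ≤ t ∧ t < (bd1.length : Int) ∧ 0 ≤ pvX v ∧
        pvX v < ((bd1.getD t.toNat []).length : Int) := by
    intro t h1 h2
    have hm : t.toNat ∈ List.range bd.length := by rw [List.mem_range]; omega
    obtain ⟨g1, g2⟩ := h6 t.toNat hm ⟨by omega, by omega⟩
    exact ⟨by omega, by rw [sh1.1]; omega, g1, by rw [sh1.2 t.toNat]; exact g2⟩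
  obtain ⟨sh2, c2⟩ := pvIncFold_cell (pvX v) (pvY1 v + 1 - pvY2 v).toNat (pvY2 v) (pvY1 v + 1) bd1 le_rfl hran2
  refine ⟨pvSameShape_trans sh1 sh2, ?_⟩
  intro y' j
  rw [c2 y' j, c1 y' j]
  unfold pvCov
  have hxe : ((pvX v).toNat = j) ↔ pvX v = (j : Int) := by omega
  split_ifs <;> omega

theorem pvA_cell (board : List (List Int)) (verts : List (List (List Int)))
    (hp : Pre_apply_verts board verts) :
    pvSameShape board (apply_verts board verts) ∧
    ∀ y' j : Nat,
      pvCell (apply_verts board verts) y' j =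
        pvCell board y' j +
          ((verts.map (fun v => if pvX v = (j : Int) then pvCov v (y' : Int) else 0)).sum) := by
  induction verts generalizing board with
  | nil =>
    refine ⟨pvSameShape_refl board, fun y' j => by simp [apply_verts]⟩
  | cons v rest ih =>
    obtain ⟨h1, h2, h3, h4, h5, h6⟩ := hp v (List.mem_cons_self)
    obtain ⟨sh1, c1⟩ := pvStepA_cell board v h4 h5 h6
    set bd1 := (PySem.List.pyRange (pvY2 v) (pvY1 v + 1)).foldl (fun bb y => pvInc bb y (pvX v))
      ((PySem.List.pyRange (pvY1 v) (pvY2 v + 1)).foldl (fun bb y => pvInc bb y (pvX v)) board) with hbd1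
    have hprest : Pre_apply_verts bd1 rest :=
      pvPre_shape rest sh1 (fun w hw => hp w (List.mem_cons_of_mem v hw))
    obtain ⟨sh2, c2⟩ := ih bd1 hprest
    have hav : apply_verts board (v :: rest) = apply_verts bd1 rest := rfl
    refine ⟨pvSameShape_trans sh1 (by rw [hav] at *; exact sh2), ?_⟩
    intro y' j
    rw [hav, c2 y' j, c1 y' j, List.map_cons, List.sum_cons]
    ring

-- ---------- B side ----------

def pvInit (n : Nat) : List Int := List.replicate (n + 1) 0

def pvDSum (n : Nat) (verts : List (List (List Int))) (x : Int) : List Int :=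
  (verts.filter (fun v => decide (pvX v = x))).foldl (fun d v => pvVDiff v d) (pvInit n)

theorem pvStepB_eq (init : List Int) (cols : PySem.Dict Int (List Int)) (v : List (List Int)) :
    (cols.setdefault (pvX v) init).insert (pvX v)
        (pvVDiff v ((cols.setdefault (pvX v) init).getD (pvX v) init)) =
      cols.insert (pvX v) (pvVDiff v (cols.getD (pvX v) init)) := by
  rw [PySem.Dict.getD_setdefault_self]
  by_cases h : cols.contains (pvX v)
  · rw [PySem.Dict.setdefault_of_contains _ _ h]
  · rw [PySem.Dict.setdefault_of_not_contains _ _ (by simp [h]), PySem.Dict.insert_insert_self]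

theorem pvFold_getD (init : List Int) :
    ∀ (l : List (List (List Int))) (d : PySem.Dict Int (List Int)) (x : Int),
      (l.foldl (fun d v => d.insert (pvX v) (pvVDiff v (d.getD (pvX v) init))) d).getD x init =
        (l.filter (fun v => decide (pvX v = x))).foldl (fun dd v => pvVDiff v dd) (d.getD x init) := by
  intro l
  induction l with
  | nil => intro d x; rfl
  | cons v t ih =>
    intro d x
    simp only [List.foldl_cons, List.filter_cons]
    by_cases h : pvX v = x
    · rw [if_pos (by simp [h]), List.foldl_cons, ih,
        PySem.Dict.getD_insert, if_pos h.symm, h]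
    · rw [if_neg (by simp [h]), ih, PySem.Dict.getD_insert,
        if_neg (fun hh => h hh.symm)]

theorem pvPref_succ (d : List Int) (y : Nat) :
    pvPref d (y + 1) = pvPref d y + d.getD (y + 1) 0 := by
  simp [pvPref, List.range_succ]
  ring

theorem pvPref_set (d : List Int) (p : Nat) (w : Int) :
    ∀ y : Nat, pvPref (d.set p w) y =
      pvPref d y + (if p ≤ y ∧ p < d.length then w - d.getD p 0 else 0) := by
  intro y
  induction y with
  | zero =>
    show ((List.range 1).map _).sum = ((List.range 1).map _).sum + _
    simp only [List.range_one, List.map_cons, List.map_nil, List.sum_cons, List.sum_nil]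
    rw [pv_getD_set]
    by_cases hp0 : p = 0
    · subst hp0; split_ifs <;> omega
    · split_ifs <;> omega
  | succ m ih =>
    rw [pvPref_succ, pvPref_succ, ih, pv_getD_set]
    by_cases hpm : p = m + 1
    · subst hpm; split_ifs <;> omega
    · split_ifs <;> omega

theorem pvPref_init (n y : Nat) : pvPref (pvInit n) y = 0 := by
  simp [pvPref, pvInit]

theorem pv_pref_bump (d : List Int) (p : Int) (w : Int) (h0 : 0 ≤ p) (hlen : p.toNat < d.length) (y : Nat) :
    pvPref (PySem.List.pySetD d p (PySem.List.pyGetD d p 0 + w)) y =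
      pvPref d y + (if p ≤ (y : Int) then w else 0) := by
  have hget : PySem.List.pyGetD d p 0 = d.getD p.toNat 0 := by
    rw [PySem.List.pyGetD_eq_getElem d (0:Int) h0 (by omega)]
    exact (List.getD_eq_getElem d 0 hlen).symm
  rw [PySem.List.pySetD_of_nonneg _ _ h0, hget, pvPref_set]
  split_ifs <;> omega

theorem pvVDiff_len (v : List (List Int)) (d : List Int) : (pvVDiff v d).length = d.length := by
  simp only [pvVDiff]
  split_ifs <;> simp [PySem.List.length_pySetD]

theorem pvDiffPair_pref (d : List Int) (a b : Int) (n : Nat) (hd : d.length = n + 1)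
    (ha : 0 ≤ a) (hab : a ≤ b) (hb : b < (n : Int)) (y : Nat) :
    pvPref (PySem.List.pySetD (PySem.List.pySetD d a (PySem.List.pyGetD d a 0 + 1)) (b + 1)
        (PySem.List.pyGetD (PySem.List.pySetD d a (PySem.List.pyGetD d a 0 + 1)) (b + 1) 0 - 1)) y =
      pvPref d y + (if a ≤ (y : Int) ∧ (y : Int) ≤ b then 1 else 0) := by
  have h1 : a.toNat < d.length := by omega
  have h2 : (b + 1).toNat < (PySem.List.pySetD d a (PySem.List.pyGetD d a 0 + 1)).length := by
    rw [PySem.List.length_pySetD]; omega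
  rw [sub_eq_add_neg, pv_pref_bump _ (b + 1) (-1) (by omega) h2, pv_pref_bump d a 1 ha h1]
  split_ifs <;> omega

theorem pvVDiff_pref (v : List (List Int)) (d : List Int) (n : Nat) (hd : d.length = n + 1)
    (hlo : 0 ≤ min (pvY1 v) (pvY2 v)) (hhi : max (pvY1 v) (pvY2 v) < (n : Int)) (y : Nat) :
    pvPref (pvVDiff v d) y = pvPref d y + pvCov v (y : Int) := by
  simp only [pvVDiff, pvCov]
  by_cases h12 : pvY1 v ≤ pvY2 v <;> by_cases h21 : pvY2 v ≤ pvY1 v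
  · -- y1 = y2 : both branches fire
    rw [if_pos h12, if_pos h21,
      pvDiffPair_pref _ _ _ n (by simp [PySem.List.length_pySetD, hd]) (by omega) h21 (by omega),
      pvDiffPair_pref d _ _ n hd (by omega) h12 (by omega)]
    split_ifs <;> omega
  · rw [if_pos h12, if_neg h21,
      pvDiffPair_pref d _ _ n hd (by omega) h12 (by omega)]
    split_ifs <;> omega
  · rw [if_neg h12, if_pos h21,
      pvDiffPair_pref d _ _ n hd (by omega) h21 (by omega)]
    split_ifs <;> omega
  · omega

theorem pvVDiffFold (n : Nat) :
    ∀ (l : List (List (List Int))) (d : List Int), d.length = n + 1 →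
      (∀ v ∈ l, 0 ≤ min (pvY1 v) (pvY2 v) ∧ max (pvY1 v) (pvY2 v) < (n : Int)) →
      (l.foldl (fun d v => pvVDiff v d) d).length = n + 1 ∧
      ∀ y : Nat, pvPref (l.foldl (fun d v => pvVDiff v d) d) y =
        pvPref d y + (l.map (fun v => pvCov v (y : Int))).sum := by
  intro l
  induction l with
  | nil => intro d hd _; exact ⟨hd, fun y => by simp⟩
  | cons v t ih =>
    intro d hd hb
    obtain ⟨hv1, hv2⟩ := hb v (List.mem_cons_self)
    obtain ⟨ihl, ihp⟩ := ih (pvVDiff v d) (by rw [pvVDiff_len]; exact hd)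
      (fun w hw => hb w (List.mem_cons_of_mem v hw))
    refine ⟨ihl, fun y => ?_⟩
    simp only [List.foldl_cons, List.map_cons, List.sum_cons]
    rw [ihp y, pvVDiff_pref v d n hd hv1 hv2 y]
    ring

theorem pvCov_cover (v : List (List Int)) (y : Int) (h : pvCov v y ≠ 0) :
    min (pvY1 v) (pvY2 v) ≤ y ∧ y ≤ max (pvY1 v) (pvY2 v) := by
  unfold pvCov at h; split_ifs at h <;> omega

theorem pv_sum_cov_ne (l : List (List (List Int))) (y : Int)
    (h : (l.map (fun v => pvCov v y)).sum ≠ 0) : ∃ v ∈ l, pvCov v y ≠ 0 := by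
  by_contra hc
  exact h (List.sum_eq_zero (by
    intro z hz
    obtain ⟨v, hv, rfl⟩ := List.mem_map.mp hz
    by_contra hz0
    exact hc ⟨v, hv, hz0⟩))

theorem pvRunFold (x : Int) (d : List Int) :
    ∀ (m : Nat) (bd : List (List Int)), m ≤ bd.length →
      (∀ y : Nat, y < bd.length → pvPref d y ≠ 0 →
        0 ≤ x ∧ x < ((bd.getD y []).length : Int)) →
      pvSameShape bd ((List.range m).foldl (fun (st : List (List Int) × Int) (t : Nat) =>
          let run := st.2 + PySem.List.pyGetD d (t : Int) 0
          (if run ≠ 0 then pvAddCell st.1 (t : Int) x run else st.1, run)) (bd, 0)).1 ∧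
      ((List.range m).foldl (fun (st : List (List Int) × Int) (t : Nat) =>
          let run := st.2 + PySem.List.pyGetD d (t : Int) 0
          (if run ≠ 0 then pvAddCell st.1 (t : Int) x run else st.1, run)) (bd, 0)).2 =
        ((List.range m).map (fun t => d.getD t 0)).sum ∧
      ∀ y' j : Nat,
        pvCell ((List.range m).foldl (fun (st : List (List Int) × Int) (t : Nat) =>
            let run := st.2 + PySem.List.pyGetD d (t : Int) 0
            (if run ≠ 0 then pvAddCell st.1 (t : Int) x run else st.1, run)) (bd, 0)).1 y' j =
          pvCell bd y' j + (if x = (j : Int) ∧ y' < m then pvPref d y' else 0) := by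
  intro m
  induction m with
  | zero =>
    intro bd _ _
    refine ⟨pvSameShape_refl bd, by simp, fun y' j => by simp⟩
  | succ m ih =>
    intro bd hm hx
    obtain ⟨ihs, ihr, ihc⟩ := ih bd (by omega) hx
    set loopf := fun (st : List (List Int) × Int) (t : Nat) =>
      let run := st.2 + PySem.List.pyGetD d (t : Int) 0
      (if run ≠ 0 then pvAddCell st.1 (t : Int) x run else st.1, run) with hloopf
    have hsplit : (List.range (m + 1)).foldl loopf (bd, 0) =
        loopf ((List.range m).foldl loopf (bd, 0)) m := by
      rw [List.range_succ, List.foldl_append, List.foldl_cons, List.foldl_nil]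
    set st := (List.range m).foldl loopf (bd, 0) with hst
    have hrun : st.2 + PySem.List.pyGetD d (m : Int) 0 = pvPref d m := by
      rw [ihr]
      have : PySem.List.pyGetD d (m : Int) 0 = d.getD m 0 := by
        simp [PySem.List.pyGetD_natCast]
      rw [this, pvPref]
      rw [List.range_succ]
      simp
    rw [hsplit]
    by_cases hz : st.2 + PySem.List.pyGetD d (m : Int) 0 ≠ 0
    · -- the cell (m, x) is bumped by run = pvPref d m ≠ 0
      have hpm : pvPref d m ≠ 0 := by rw [← hrun]; exact hz
      obtain ⟨hx0, hxlt⟩ := hx m (by omega) hpm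
      have hylt2 : ((m : Nat) : Int) < (st.1.length : Int) := by
        rw [ihs.1]; exact_mod_cast (by omega : m < bd.length)
      have hxlt2 : x < ((st.1.getD ((m : Int)).toNat []).length : Int) := by
        simp only [Int.toNat_natCast]
        rw [ihs.2 m]; exact_mod_cast hxlt
      have hbump := fun (y' j : Nat) =>
        pvAddCell_cell st.1 (m : Int) x (st.2 + PySem.List.pyGetD d (m : Int) 0) y' j
          (by omega) hylt2 hx0 hxlt2
      have hstep : loopf st m = (pvAddCell st.1 (m : Int) x (st.2 + PySem.List.pyGetD d (m : Int) 0), st.2 + PySem.List.pyGetD d (m : Int) 0) := by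
        simp only [hloopf]
        rw [if_pos hz]
      rw [hstep]
      have hgm : PySem.List.pyGetD d (m : Int) 0 = d.getD m 0 := by
        simp [PySem.List.pyGetD_natCast]
      refine ⟨pvSameShape_trans ihs (pvAddCell_shape st.1 (m : Int) x _ (by omega)), ?_, ?_⟩
      · rw [List.range_succ]
        simp only [List.map_append, List.map_cons, List.map_nil, List.sum_append,
          List.sum_cons, List.sum_nil, hgm]
        omega
      · intro y' j
        rw [hbump y' j, ihc y' j, hrun]
        simp only [Int.toNat_natCast]
        by_cases hj : x = (j : Int)
        · have hjx : x.toNat = j := by omega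
          by_cases hym : y' = m
          · subst hym
            rw [if_neg (by omega), if_pos ⟨rfl, hjx⟩, if_pos ⟨hj, by omega⟩]
            ring
          · rw [if_neg (by omega : ¬(m = y' ∧ x.toNat = j))]
            by_cases hlt : y' < m
            · rw [if_pos ⟨hj, hlt⟩, if_pos ⟨hj, by omega⟩]
              ring
            · rw [if_neg (by omega), if_neg (by omega)]
              ring
        · have hjx : ¬ x.toNat = j := by omega
          rw [if_neg (by tauto), if_neg (by tauto), if_neg (by tauto)]
          ring
    · have hstep : loopf st m = (st.1, st.2 + PySem.List.pyGetD d (m : Int) 0) := by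
        simp only [hloopf]
        rw [if_neg hz]
      have hpm : pvPref d m = 0 := by omega
      rw [hstep]
      refine ⟨ihs, ?_, ?_⟩
      · rw [List.range_succ]
        simp only [List.map_append, List.map_cons, List.map_nil, List.sum_append,
          List.sum_cons, List.sum_nil]
        have hgm : PySem.List.pyGetD d (m : Int) 0 = d.getD m 0 := by
          simp [PySem.List.pyGetD_natCast]
        omega
      · intro y' j
        rw [ihc y' j]
        by_cases hj : x = (j : Int)
        · by_cases hym : y' = m
          · subst hym
            rw [if_neg (by omega), if_pos ⟨hj, by omega⟩, hpm]
          · by_cases hlt : y' < m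
            · rw [if_pos ⟨hj, hlt⟩, if_pos ⟨hj, by omega⟩]
            · rw [if_neg (by omega), if_neg (by omega)]
        · rw [if_neg (by tauto), if_neg (by tauto)]

theorem pvPrefDSum (board : List (List Int)) (verts : List (List (List Int)))
    (hp : Pre_apply_verts board verts) (x : Int) (y : Nat) :
    pvPref (pvDSum board.length verts x) y =
      ((verts.filter (fun v => decide (pvX v = x))).map (fun v => pvCov v (y : Int))).sum := by
  have hb : ∀ v ∈ verts.filter (fun v => decide (pvX v = x)),
      0 ≤ min (pvY1 v) (pvY2 v) ∧ max (pvY1 v) (pvY2 v) < (board.length : Int) := by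
    intro v hv
    obtain ⟨_, _, _, h4, h5, _⟩ := hp v (List.mem_of_mem_filter hv)
    exact ⟨h4, h5⟩
  obtain ⟨_, h2⟩ := pvVDiffFold board.length (verts.filter (fun v => decide (pvX v = x)))
    (pvInit board.length) (by simp [pvInit]) hb
  rw [pvDSum, h2 y, pvPref_init, zero_add]

theorem pvItemsFold (board : List (List Int)) (verts : List (List (List Int)))
    (hp : Pre_apply_verts board verts) :
    ∀ (ks : List Int) (bd : List (List Int)), pvSameShape board bd →
      (∀ x ∈ ks, x ∈ verts.map pvX) →
      pvSameShape bd ((ks.map (fun x => (x, pvDSum board.length verts x))).foldl (fun b p =>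
        ((List.range board.length).foldl (fun (st : List (List Int) × Int) (t : Nat) =>
            let run := st.2 + PySem.List.pyGetD p.2 (t : Int) 0
            (if run ≠ 0 then pvAddCell st.1 (t : Int) p.1 run else st.1, run)) (b, 0)).1) bd) ∧
      ∀ y' j : Nat,
        pvCell ((ks.map (fun x => (x, pvDSum board.length verts x))).foldl (fun b p =>
          ((List.range board.length).foldl (fun (st : List (List Int) × Int) (t : Nat) =>
              let run := st.2 + PySem.List.pyGetD p.2 (t : Int) 0
              (if run ≠ 0 then pvAddCell st.1 (t : Int) p.1 run else st.1, run)) (b, 0)).1) bd) y' j =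
          pvCell bd y' j +
            (ks.map (fun x => if x = (j : Int) ∧ y' < board.length
              then pvPref (pvDSum board.length verts x) y' else 0)).sum := by
  intro ks
  induction ks with
  | nil =>
    intro bd _ _
    exact ⟨pvSameShape_refl bd, fun y' j => by simp⟩
  | cons x kt ih =>
    intro bd hsh hks
    simp only [List.map_cons, List.foldl_cons]
    have hx : ∀ y : Nat, y < bd.length → pvPref (pvDSum board.length verts x) y ≠ 0 →
        0 ≤ x ∧ x < ((bd.getD y []).length : Int) := by
      intro y hy hne
      rw [pvPrefDSum board verts hp x y] at hne
      obtain ⟨v, hvf, hcov⟩ := pv_sum_cov_ne _ _ hne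
      have hvmem : v ∈ verts := List.mem_of_mem_filter hvf
      have hxeq : pvX v = x := by simpa using List.of_mem_filter hvf
      obtain ⟨_, _, _, h4, h5, h6⟩ := hp v hvmem
      obtain ⟨hcl, hch⟩ := pvCov_cover v _ hcov
      have hyb : y < board.length := by rw [← hsh.1]; exact hy
      obtain ⟨g1, g2⟩ := h6 y (List.mem_range.mpr hyb) ⟨hcl, hch⟩
      rw [hxeq] at g1 g2
      exact ⟨g1, by rw [hsh.2 y]; exact g2⟩
    obtain ⟨s1, _, c1⟩ := pvRunFold x (pvDSum board.length verts x) board.length bd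
      (by rw [hsh.1]) hx
    obtain ⟨s2, c2⟩ := ih _ (pvSameShape_trans hsh s1)
      (fun z hz => hks z (List.mem_cons_of_mem x hz))
    refine ⟨pvSameShape_trans s1 s2, ?_⟩
    intro y' j
    rw [c2 y' j, c1 y' j, List.sum_cons]
    ring

theorem pvB_cell (board : List (List Int)) (verts : List (List (List Int)))
    (hp : Pre_apply_verts board verts) :
    pvSameShape board (apply_verts_alt board verts) ∧
    ∀ y' j : Nat,
      pvCell (apply_verts_alt board verts) y' j =
        pvCell board y' j +
          ((verts.map (fun v => if pvX v = (j : Int) then pvCov v (y' : Int) else 0)).sum) := by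
  have hcols : verts.foldl (fun (cols : PySem.Dict Int (List Int)) v =>
        (cols.setdefault (pvX v) (pvInit board.length)).insert (pvX v)
          (pvVDiff v ((cols.setdefault (pvX v) (pvInit board.length)).getD (pvX v) (pvInit board.length))))
      PySem.Dict.empty =
      verts.foldl (fun (cols : PySem.Dict Int (List Int)) v =>
        cols.insert (pvX v) (pvVDiff v (cols.getD (pvX v) (pvInit board.length)))) PySem.Dict.empty :=
    PySem.List.foldl_congr_mem _ _ _ _ (fun acc v _ => pvStepB_eq (pvInit board.length) acc v)
  have hav : apply_verts_alt board verts =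
      ((verts.foldl (fun (cols : PySem.Dict Int (List Int)) v =>
          cols.insert (pvX v) (pvVDiff v (cols.getD (pvX v) (pvInit board.length))))
        PySem.Dict.empty).items.foldl (fun b p =>
        ((List.range board.length).foldl (fun (st : List (List Int) × Int) (t : Nat) =>
            let run := st.2 + PySem.List.pyGetD p.2 (t : Int) 0
            (if run ≠ 0 then pvAddCell st.1 (t : Int) p.1 run else st.1, run)) (b, 0)).1) board) := by
    unfold apply_verts_alt
    simp only [PySem.List.pyRange_zero_natCast, List.foldl_map]
    rw [show List.replicate (board.length + 1) (0:Int) = pvInit board.length from rfl, hcols]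
  set g : PySem.Dict Int (List Int) → List (List Int) → PySem.Dict Int (List Int) :=
    fun cols v => cols.insert (pvX v) (pvVDiff v (cols.getD (pvX v) (pvInit board.length))) with hg
  have hknodup : (verts.foldl g PySem.Dict.empty).keys.Nodup :=
    PySem.Dict.nodup_keys_foldl_insert_key verts pvX
      (fun d v => pvVDiff v (d.getD (pvX v) (pvInit board.length))) PySem.Dict.empty
      PySem.Dict.nodup_keys_empty
  have hkeys : (verts.foldl g PySem.Dict.empty).keys = PySem.Set.ofList (verts.map pvX) := by
    rw [hg, PySem.Dict.keys_foldl_insert_key, PySem.Dict.keys_empty]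
    rfl
  have hitems : (verts.foldl g PySem.Dict.empty).items =
      (PySem.Set.ofList (verts.map pvX)).map (fun x => (x, pvDSum board.length verts x)) := by
    rw [PySem.Dict.items_eq_map_keys _ hknodup (pvInit board.length), hkeys]
    apply List.map_congr_left
    intro x _
    rw [hg, pvFold_getD (pvInit board.length) verts PySem.Dict.empty x, PySem.Dict.getD_empty]
    rfl
  rw [hav, hitems]
  obtain ⟨s, c⟩ := pvItemsFold board verts hp (PySem.Set.ofList (verts.map pvX)) board
    (pvSameShape_refl board) (fun x hx => (PySem.Set.mem_ofList _ _).mp hx)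
  refine ⟨s, ?_⟩
  intro y' j
  rw [c y' j]
  congr 1
  by_cases hyn : y' < board.length
  · have hform : ((PySem.Set.ofList (verts.map pvX)).map
        (fun x => if x = (j : Int) ∧ y' < board.length
          then pvPref (pvDSum board.length verts x) y' else 0)) =
        (PySem.Set.ofList (verts.map pvX)).map
          (fun x => if x = (j : Int) then pvPref (pvDSum board.length verts x) y' else 0) :=
      List.map_congr_left (fun x _ => by
        by_cases h : x = (j : Int) <;> simp [h, hyn])
    rw [hform, pv_sum_ite_nodup _ (PySem.Set.nodup_ofList _) (j : Int)
      (fun x => pvPref (pvDSum board.length verts x) y')]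
    by_cases hj : (j : Int) ∈ verts.map pvX
    · rw [if_pos ((PySem.Set.mem_ofList _ _).mpr hj), pvPrefDSum board verts hp (j : Int) y',
        pv_sum_filter verts (fun v => pvX v = (j : Int)) (fun v => pvCov v (y' : Int))]
    · rw [if_neg (fun hin => hj ((PySem.Set.mem_ofList _ _).mp hin))]
      symm
      apply List.sum_eq_zero
      intro z hz
      obtain ⟨v, hv, rfl⟩ := List.mem_map.mp hz
      rw [if_neg (fun he => hj (List.mem_map.mpr ⟨v, hv, he⟩))]
  · rw [List.sum_eq_zero, List.sum_eq_zero]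
    · intro z hz
      obtain ⟨v, hv, rfl⟩ := List.mem_map.mp hz
      have hc0 : pvCov v (y' : Int) = 0 := by
        by_contra hne
        obtain ⟨_, hch⟩ := pvCov_cover v _ hne
        obtain ⟨_, _, _, _, h5, _⟩ := hp v hv
        omega
      rw [hc0]
      split_ifs <;> rfl
    · intro z hz
      obtain ⟨x, _, rfl⟩ := List.mem_map.mp hz
      rw [if_neg (by tauto)]

theorem apply_verts_spec : Claim_equal_apply_verts := by
  intro board verts _ hpre
  unfold Spec_apply_verts
  obtain ⟨shA, cA⟩ := pvA_cell board verts hpre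
  obtain ⟨shB, cB⟩ := pvB_cell board verts hpre
  apply List.ext_getElem (by rw [shA.1, shB.1])
  intro y h1 h2
  apply List.ext_getElem
  · rw [← List.getD_eq_getElem (apply_verts board verts) [] h1,
      ← List.getD_eq_getElem (apply_verts_alt board verts) [] h2, shA.2 y, shB.2 y]
  · intro j hj1 hj2
    have e1 : pvCell (apply_verts board verts) y j = (apply_verts board verts)[y][j] := by
      unfold pvCell
      rw [List.getD_eq_getElem _ [] h1, List.getD_eq_getElem _ 0 hj1]
    have e2 : pvCell (apply_verts_alt board verts) y j = (apply_verts_alt board verts)[y][j] := by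
      unfold pvCell
      rw [List.getD_eq_getElem _ [] h2, List.getD_eq_getElem _ 0 hj2]
    rw [← e1, ← e2, cA y j, cB y j]
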